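-- pv_equiv track=rewrite | github.com/DyDy-star/-plogp- | verl/verl/utils/reward_score/ttrl_math/__init__.py | process_thoughts
-- ===== SOURCE A (Python) =====
-- def process_thoughts(resp):
--     """
--     自然步骤划分函数 (取消 15 步上限限制)
--
--     功能：
--     1. 按行分割响应，去除空行
--     2. 合并包含LaTeX公式的多行（检测 \\[ 和 \\]）
--     3. 保留自然步数，不做强制合并
--
--     Args:
--         resp: 模型响应文本
--
--     Returns:
--         推理步骤列表
--     """
--     thoughts = [line.strip() for line in resp.split('\n') if line.strip()]
--     result = []
--     merge_mode = False
--     temp_merge = []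
--
--     for item in thoughts:
--         if "\\[" in item and "\\]" not in item:
--             merge_mode = True
--             temp_merge.append(item)
--         elif "\\]" in item and "\\[" not in item:
--             merge_mode = False
--             temp_merge.append(item)
--             if temp_merge:
--                 result.append("\n".join(temp_merge))
--                 temp_merge = []
--         elif merge_mode:
--             temp_merge.append(item)
--         else:
--             result.append(item)
--
--     if len(temp_merge) > 0:
--         result += temp_merge
--
--     return result
-- ===== SOURCE B (Python) =====
-- def process_thoughts(resp):
--     lines = [line.strip() for line in resp.split('\n') if line.strip()]
--     n = len(lines)
--     result = []
--     i = 0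
--     while i < n:
--         line = lines[i]
--         if '\\[' in line and '\\]' not in line:
--             # scan forward for the closing line
--             j = i + 1
--             while j < n and not ('\\]' in lines[j] and '\\[' not in lines[j]):
--                 j += 1
--             if j < n:
--                 result.append('\n'.join(lines[i:j + 1]))
--                 i = j + 1
--             else:
--                 # no closer: the collected lines are appended individually
--                 result.extend(lines[i:])
--                 i = n
--         else:
--             result.append(line)
--             i += 1
--     return result
-- ===== Notes on version B (the rewrite author's own statement) =====
-- stated objective: alternative
-- what changed: Replaces A's merge-mode flag with a temp buffer threaded through one fold by an index-style outer loop that, on a line opening a LaTeX display block, scans forward for the closing line and emits the joined block in one step (unclosed blocks fall out as the remaining suffix appended individually).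
import Mathlib
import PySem

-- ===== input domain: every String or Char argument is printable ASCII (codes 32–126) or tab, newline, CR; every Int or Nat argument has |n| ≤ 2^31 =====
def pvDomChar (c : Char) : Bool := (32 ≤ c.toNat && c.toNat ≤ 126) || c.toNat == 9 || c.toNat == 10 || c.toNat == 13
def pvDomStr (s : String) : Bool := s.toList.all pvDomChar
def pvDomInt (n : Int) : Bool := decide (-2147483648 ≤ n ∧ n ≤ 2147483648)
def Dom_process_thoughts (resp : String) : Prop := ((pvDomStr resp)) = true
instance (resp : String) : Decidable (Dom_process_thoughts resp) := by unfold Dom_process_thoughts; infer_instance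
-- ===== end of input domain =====

-- B replaces A's merge-mode flag + temp buffer fold by an index-style scan: on a line that
-- opens a LaTeX display block it looks ahead for the closing line and emits the joined block
-- at once (objective: alternative decomposition, same cost).

-- ===== PORT A =====
-- one iteration of A's for-loop; state = (result, merge_mode, temp_merge)
def pvStepA (st : List String × Bool × List String) (item : String) :
    List String × Bool × List String :=
  let (result, merge_mode, temp) := st
  if PySem.Str.isIn "\\[" item && !(PySem.Str.isIn "\\]" item) then
    (result, true, temp ++ [item])
  else if PySem.Str.isIn "\\]" item && !(PySem.Str.isIn "\\[" item) then
    let temp' := temp ++ [item]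
    if temp'.length > 0 then (result ++ [PySem.Str.join "\n" temp'], false, [])
    else (result, false, temp')
  else if merge_mode then
    (result, merge_mode, temp ++ [item])
  else
    (result ++ [item], merge_mode, temp)

def process_thoughts (resp : String) : List String :=
  let thoughts := (((PySem.Str.split? resp "\n").getD []).map PySem.Str.strip).filter (fun s => s ≠ "")
  match thoughts.foldl pvStepA ([], false, []) with
  | (result, _m, temp) => if temp.length > 0 then result ++ temp else result

-- ===== PORT B =====
def pvOpener (l : String) : Bool := PySem.Str.isIn "\\[" l && !(PySem.Str.isIn "\\]" l)
def pvCloser (l : String) : Bool := PySem.Str.isIn "\\]" l && !(PySem.Str.isIn "\\[" l)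

-- the inner while loop: scan forward for the first closing line
def pvScan : List String → Option (List String × String × List String)
  | [] => none
  | x :: xs =>
      if pvCloser x then some ([], x, xs)
      else
        match pvScan xs with
        | some (pre, c, rest) => some (x :: pre, c, rest)
        | none => none

theorem pvScan_length_lt {xs pre rest : List String} {c : String}
    (h : pvScan xs = some (pre, c, rest)) : rest.length < xs.length := by
  induction xs generalizing pre with
  | nil => simp [pvScan] at h
  | cons x xs ih =>
    simp only [pvScan] at h
    split at h
    · cases h; simp
    · cases hs : pvScan xs with
      | none => rw [hs] at h; cases h
      | some v =>
        obtain ⟨pre', c', rest'⟩ := v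
        rw [hs] at h
        cases h
        have := ih hs
        simpa using Nat.lt_trans this (Nat.lt_succ_self _)

-- the outer while loop over the line index, as recursion on the remaining lines
def pvLoopB : List String → List String
  | [] => []
  | x :: xs =>
    if pvOpener x then
      match h : pvScan xs with
      | some (pre, c, rest) => PySem.Str.join "\n" (x :: (pre ++ [c])) :: pvLoopB rest
      | none => x :: xs
    else x :: pvLoopB xs
termination_by l => l.length
decreasing_by
  · exact Nat.lt_succ_of_lt (pvScan_length_lt h)
  · simp

def process_thoughts_alt (resp : String) : List String :=
  pvLoopB ((((PySem.Str.split? resp "\n").getD []).map PySem.Str.strip).filter (fun s => s ≠ ""))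

-- ===== PRECONDITION & SPEC =====
def Spec_process_thoughts (resp : String) (out : List String) : Prop := out = process_thoughts_alt resp
instance (resp : String) (out : List String) : Decidable (Spec_process_thoughts resp out) := by unfold Spec_process_thoughts; infer_instance

-- ===== CLAIM (what is proved, stated in full; the proofs are below) =====
def Claim_equal_process_thoughts : Prop := ∀ (resp : String), Dom_process_thoughts resp → Spec_process_thoughts resp (process_thoughts resp)

-- ===== LEMMAS AND PROOFS =====

-- A's finalisation step ('if len(temp_merge) > 0: result += temp_merge')
def pvFinA (st : List String × Bool × List String) : List String :=
  if st.2.2.length > 0 then st.1 ++ st.2.2 else st.1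

theorem pvFinA_eq (res temp : List String) (m : Bool) :
    pvFinA (res, m, temp) = res ++ temp := by
  cases temp <;> simp [pvFinA]

theorem pvJoin_singleton (x : String) : PySem.Str.join "\n" [x] = x := by
  simp [PySem.Str.join, PySem.Chars.join_singleton]

-- A's fold in merge mode consumes lines exactly up to the first closer that pvScan finds
theorem pvFoldA_merge (xs : List String) : ∀ res temp : List String,
    pvFinA (xs.foldl pvStepA (res, true, temp)) =
      match pvScan xs with
      | some (pre, c, rest) =>
          pvFinA (rest.foldl pvStepA
            (res ++ [PySem.Str.join "\n" (temp ++ pre ++ [c])], false, []))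
      | none => res ++ temp ++ xs := by
  induction xs with
  | nil => intro res temp; simp [pvScan, pvFinA_eq]
  | cons x xs ih =>
    intro res temp
    cases h1 : PySem.Str.isIn "\\[" x <;> cases h2 : PySem.Str.isIn "\\]" x <;>
      simp only [List.foldl_cons, pvStepA, pvScan, pvCloser, h1, h2, Bool.not_true,
        Bool.not_false, Bool.and_true, Bool.and_false, Bool.false_eq_true, if_true, if_false]
    · -- neither marker: merge_mode appends to temp
      rw [ih]
      cases hs : pvScan xs with
      | none => simp
      | some v => obtain ⟨pre, c, rest⟩ := v; simp
    · -- closer: block is emitted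
      simp
    · -- opener: stay in merge mode
      rw [ih]
      cases hs : pvScan xs with
      | none => simp
      | some v => obtain ⟨pre, c, rest⟩ := v; simp
    · -- both markers: merge_mode appends to temp
      rw [ih]
      cases hs : pvScan xs with
      | none => simp
      | some v => obtain ⟨pre, c, rest⟩ := v; simp

-- the main bridge: A's fold from a clean state equals B's scan loop
theorem pvFoldA_eq_loopB : ∀ (n : Nat) (xs : List String), xs.length ≤ n →
    ∀ res : List String,
      pvFinA (xs.foldl pvStepA (res, false, [])) = res ++ pvLoopB xs := by
  intro n
  induction n with
  | zero =>
    intro xs hlen res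
    rw [List.length_eq_zero_iff.mp (Nat.le_zero.mp hlen)]
    simp [pvLoopB, pvFinA]
  | succ n ih =>
    intro xs hlen res
    cases xs with
    | nil => simp [pvLoopB, pvFinA]
    | cons x xs =>
      simp only [List.length_cons, Nat.succ_le_succ_iff] at hlen
      cases h1 : PySem.Str.isIn "\\[" x <;> cases h2 : PySem.Str.isIn "\\]" x <;>
        simp only [List.foldl_cons, pvStepA, pvLoopB, pvOpener, h1, h2, Bool.not_true,
          Bool.not_false, Bool.and_true, Bool.and_false, Bool.true_and, Bool.false_and,
          Bool.false_eq_true, if_true, if_false, List.nil_append]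
      · -- plain line
        rw [ih xs hlen]
        simp
      · -- stray closer: joined as a one-element block
        norm_num
        rw [ih xs hlen]
        simp [pvJoin_singleton]
      · -- opener: A enters merge mode, B scans forward
        rw [pvFoldA_merge]
        cases hs : pvScan xs with
        | none => simp [pvFinA_eq]
        | some v =>
          obtain ⟨pre, c, rest⟩ := v
          have hrest : rest.length ≤ n :=
            Nat.le_of_lt (Nat.lt_of_lt_of_le (pvScan_length_lt hs) hlen)
          simp [ih rest hrest]
      · -- line with both markers outside merge mode: plain
        rw [ih xs hlen]
        simp

-- ===== VERDICT (by name: the statement is the Claim_ definition above) =====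
theorem process_thoughts_spec : Claim_equal_process_thoughts := by
  intro resp _
  unfold Spec_process_thoughts process_thoughts process_thoughts_alt
  have h := pvFoldA_eq_loopB
    ((((PySem.Str.split? resp "\n").getD []).map PySem.Str.strip).filter (fun s => s ≠ "")).length
    ((((PySem.Str.split? resp "\n").getD []).map PySem.Str.strip).filter (fun s => s ≠ ""))
    le_rfl []
  simp only [List.nil_append] at h
  rw [← h]
  rfl
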